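-- pv_equiv track=rewrite | github.com/jsta/foo.bar | 02_task.py | validate_combination
-- ===== SOURCE A (Python) =====
-- import itertools
--
-- def divisible_by_three(x):
--     if x % 3 == 0:
--         return True
--     else:
--         return False
--
-- def collapse_tuples(input):
--     outer = []
--     for x in input:
--         inner = []
--         for y in x:
--             temp = str(y)
--             inner.append(temp)
--         outer.append(int(''.join(inner)))
--     return outer
--
-- def validate_combination(combos):
--     # combos = res
--     combos = collapse_tuples(combos)
--     is_divisible_by_three = [divisible_by_three(combo) for combo in combos]
--
--     if any(is_divisible_by_three):
--         res = list(itertools.compress(combos, is_divisible_by_three))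
--         return max(res)
--     else:
--         return 0
-- ===== SOURCE B (Python) =====
-- def validate_combination(combos):
--     vals = sorted((int(''.join(map(str, t))) for t in combos), reverse=True)
--     for v in vals:
--         if v % 3 == 0:
--             return v
--     return 0
-- ===== Notes on version B (the rewrite author's own statement) =====
-- stated objective: alternative
-- what changed: Instead of A's collapse/boolean-mask/compress/max pipeline, B sorts the collapsed values in descending order and returns the first one divisible by 3 (else 0), i.e. sort-then-scan replaces filter-then-max.
import Mathlib
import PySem

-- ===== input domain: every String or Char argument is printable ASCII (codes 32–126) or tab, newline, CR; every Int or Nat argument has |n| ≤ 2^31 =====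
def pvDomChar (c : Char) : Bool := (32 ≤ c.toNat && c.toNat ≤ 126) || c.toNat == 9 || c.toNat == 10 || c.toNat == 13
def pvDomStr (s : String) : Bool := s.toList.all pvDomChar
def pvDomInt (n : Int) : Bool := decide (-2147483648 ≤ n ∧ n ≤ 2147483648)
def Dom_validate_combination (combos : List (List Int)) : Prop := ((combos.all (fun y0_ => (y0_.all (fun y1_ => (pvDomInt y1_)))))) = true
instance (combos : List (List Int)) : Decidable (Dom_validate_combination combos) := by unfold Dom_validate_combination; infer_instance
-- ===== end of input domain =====

-- B replaces A's filter-then-max pipeline by sort-then-scan: sort the collapsed values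
-- descending and return the first one divisible by 3 (else 0); same return value wherever A returns.

-- ===== PORT A =====
def divisible_by_three (x : Int) : Bool :=
  if PySem.Int.mod x 3 = 0 then true else false

-- int(''.join(...)) raises outside Pre_; the port uses .getD 0 there (excluded by Pre_)
def collapse_tuples (input : List (List Int)) : List Int :=
  input.foldl (fun outer x =>
    let inner := x.foldl (fun inner y =>
      let temp := PySem.Int.toStr y
      inner ++ [temp]) []
    outer ++ [(PySem.Int.ofStr? (PySem.Str.join "" inner)).getD 0]) []

def validate_combination (combos : List (List Int)) : Int :=
  let combos := collapse_tuples combos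
  let is_divisible_by_three := combos.map (fun combo => divisible_by_three combo)
  if is_divisible_by_three.any (fun b => b) then
    let res := (combos.zip is_divisible_by_three).filterMap
      (fun p => if p.2 then some p.1 else none)   -- itertools.compress
    (PySem.List.max? res (fun y => y)).getD 0     -- max of a nonempty list
  else 0

-- ===== PORT B =====
def validate_combination_alt (combos : List (List Int)) : Int :=
  let vals := PySem.List.sorted
    (combos.map (fun t => (PySem.Int.ofStr? (PySem.Str.join "" (t.map PySem.Int.toStr))).getD 0))
    (fun v => v) true
  match vals.find? (fun v => PySem.Int.mod v 3 == 0) with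
  | some v => v
  | none => 0

-- ===== PRECONDITION & SPEC =====
-- Pre_ excludes exactly the inputs where Python's int(''.join(...)) raises ValueError (in
-- both A and B): an empty inner list, or a negative element after the first position.
def Pre_validate_combination (combos : List (List Int)) : Prop :=
  ∀ t ∈ combos, t ≠ [] ∧ ∀ y ∈ t.drop 1, 0 ≤ y
instance (combos : List (List Int)) : Decidable (Pre_validate_combination combos) := by
  unfold Pre_validate_combination; infer_instance

def pvWitness_validate_combination : List (List Int) := [[3, 4], [-1, 2]]

def Spec_validate_combination (combos : List (List Int)) (out : Int) : Prop := out = validate_combination_alt combos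
instance (combos : List (List Int)) (out : Int) : Decidable (Spec_validate_combination combos out) := by unfold Spec_validate_combination; infer_instance

-- ===== CLAIM (what is proved, stated in full; the proofs are below) =====
def Claim_equal_validate_combination : Prop := ∀ (combos : List (List Int)), Dom_validate_combination combos → Pre_validate_combination combos → Spec_validate_combination combos (validate_combination combos)

-- ===== LEMMAS AND PROOFS =====

-- the collapsed value of one tuple (shared abbreviation for the proofs only)
def cv (t : List Int) : Int :=
  (PySem.Int.ofStr? (PySem.Str.join "" (t.map PySem.Int.toStr))).getD 0

theorem foldl_append_map {α β : Type} (f : α → β) (l : List α) (acc : List β) :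
    l.foldl (fun acc y => acc ++ [f y]) acc = acc ++ l.map f := by
  induction l generalizing acc with
  | nil => simp
  | cons a l ih => simp [List.foldl, ih]

theorem collapse_eq_map (input : List (List Int)) :
    collapse_tuples input = input.map cv := by
  unfold collapse_tuples
  have h : ∀ x : List Int,
      x.foldl (fun inner y => inner ++ [PySem.Int.toStr y]) [] = x.map PySem.Int.toStr := by
    intro x; simpa using foldl_append_map PySem.Int.toStr x []
  have hout : ∀ acc, input.foldl (fun outer x =>
      outer ++ [(PySem.Int.ofStr? (PySem.Str.join ""
        (x.foldl (fun inner y => inner ++ [PySem.Int.toStr y]) []))).getD 0]) acc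
      = acc ++ input.map cv := by
    intro acc
    calc input.foldl (fun outer x =>
        outer ++ [(PySem.Int.ofStr? (PySem.Str.join ""
          (x.foldl (fun inner y => inner ++ [PySem.Int.toStr y]) []))).getD 0]) acc
        = input.foldl (fun outer x => outer ++ [cv x]) acc := by
          simp only [h, cv]
      _ = acc ++ input.map cv := foldl_append_map cv input acc
  simpa using hout []

theorem compress_eq_filter (l : List Int) :
    (l.zip (l.map (fun c => divisible_by_three c))).filterMap
      (fun p => if p.2 then some p.1 else none)
    = l.filter divisible_by_three := by
  induction l with
  | nil => rfl
  | cons a l ih =>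
    simp only [List.zip] at ih ⊢
    by_cases h : divisible_by_three a = true <;>
      simp [List.filter, h, ih]

theorem any_iff_filter_ne (l : List Int) :
    (l.map (fun c => divisible_by_three c)).any (fun b => b) = true ↔
      l.filter divisible_by_three ≠ [] := by
  simp [List.any_map, Function.comp, List.filter_eq_nil_iff]

-- the two divisibility predicates used by the two ports are the same Bool function
theorem pred_eq : (fun v => PySem.Int.mod v 3 == 0) = divisible_by_three := by
  funext v
  unfold divisible_by_three
  by_cases h : PySem.Int.mod v 3 = 0
  · rw [h, if_pos rfl]; rfl
  · rw [if_neg h]; exact beq_eq_false_iff_ne.mpr h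

-- A's result on a nonempty filtered list is Mathlib's List.max?
theorem A_val_eq_max? (h : Int) (t : List Int) :
    (PySem.List.max? (h :: t) (fun y => y)).getD 0 = (List.max? (h :: t)).getD 0 := by
  simp [PySem.List.max?_id_cons, List.max?]

-- B's result: the first element of the descending-sorted list satisfying p is the max of the filter
theorem B_find_eq_max? (l : List Int) (hne : l.filter divisible_by_three ≠ []) :
    (PySem.List.sorted l (fun v => v) true).find? divisible_by_three
      = (l.filter divisible_by_three).max? := by
  set s := PySem.List.sorted l (fun v => v) true with hs
  have hperm : (s.filter divisible_by_three).Perm (l.filter divisible_by_three) :=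
    (PySem.List.sorted_perm l (fun v => v) true).filter _
  have hpair : (s.filter divisible_by_three).Pairwise (fun a b => b ≤ a) :=
    List.Pairwise.sublist (List.filter_sublist (l := s))
      (PySem.List.sorted_pairwise_rev l (fun v => v))
  have hne' : s.filter divisible_by_three ≠ [] := by
    intro h0
    exact hne (List.Perm.eq_nil ((h0 ▸ hperm).symm))
  obtain ⟨v, t, hvt⟩ := List.exists_cons_of_ne_nil hne'
  rw [← List.head?_filter, hvt, List.head?_cons]
  symm
  rw [List.max?_eq_some_iff]
  constructor
  · exact hperm.mem_iff.mp (hvt ▸ List.mem_cons_self)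
  · intro b hb
    have hb' : b ∈ s.filter divisible_by_three := hperm.mem_iff.mpr hb
    rw [hvt] at hb'
    rcases List.mem_cons.mp hb' with h | h
    · exact le_of_eq h
    · exact (List.pairwise_cons.mp (hvt ▸ hpair)).1 b h

theorem sorted_find_none (l : List Int) (he : l.filter divisible_by_three = []) :
    (PySem.List.sorted l (fun v => v) true).find? divisible_by_three = none := by
  rw [List.find?_eq_none]
  intro x hx
  have : x ∈ l := (PySem.List.sorted_perm l (fun v => v) true).mem_iff.mp hx
  intro hpx
  have : x ∈ l.filter divisible_by_three := List.mem_filter.mpr ⟨this, hpx⟩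
  simp [he] at this

-- ===== VERDICT (by name: the statement is the Claim_ definition above) =====
theorem validate_combination_spec : Claim_equal_validate_combination := by
  intro combos _ _
  show validate_combination combos = validate_combination_alt combos
  have hcv : (fun t : List Int =>
      (PySem.Int.ofStr? (PySem.Str.join "" (t.map PySem.Int.toStr))).getD 0) = cv := rfl
  simp only [validate_combination, validate_combination_alt, collapse_eq_map, hcv,
    pred_eq, compress_eq_filter]
  set l := combos.map cv with hl
  by_cases h : (l.map (fun combo => divisible_by_three combo)).any (fun b => b) = true
  · have hne := (any_iff_filter_ne l).mp h
    obtain ⟨x, t, hxt⟩ := List.exists_cons_of_ne_nil hne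
    rw [if_pos h, B_find_eq_max? l hne, hxt, A_val_eq_max?]
    simp [List.max?]
  · have he : l.filter divisible_by_three = [] := by
      by_contra hc; exact h ((any_iff_filter_ne l).mpr hc)
    rw [if_neg h, sorted_find_none l he]
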